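-- pv_equiv track=rewrite | github.com/Seedname/Bananagrams | bananagrams/decrypt.py | cull_extras
-- ===== SOURCE A (Python) =====
-- def cull_extras(possible_keys: dict) -> dict:
--     confirmed = set()
--     for mapping, letters in possible_keys.items():
--         if len(letters) == 1:
--             confirmed.update(letters)
--
--     while True:
--         next_confirmed = set()
--
--         for mapping, letters in possible_keys.items():
--             if len(letters) > 1:
--                 possible_keys[mapping] -= confirmed
--
--                 if len(possible_keys[mapping]) == 1:
--                     next_confirmed.update(letters)
--
--         if len(next_confirmed) == 0:
--             break
--
--         confirmed = next_confirmed
--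
--     return possible_keys
-- ===== SOURCE B (Python) =====
-- def cull_extras(possible_keys: dict) -> dict:
--     # Index each multi-candidate mapping under every letter it contains, then
--     # propagate confirmed letters round by round, touching only the mappings
--     # that actually contain a letter confirmed in that round.
--     index = {}
--     active = set()
--     confirmed = set()
--     for mapping, letters in possible_keys.items():
--         if len(letters) == 1:
--             confirmed |= letters
--         elif len(letters) > 1:
--             active.add(mapping)
--             for letter in letters:
--                 index.setdefault(letter, []).append(mapping)
--
--     while confirmed:
--         touched = set()
--         for c in confirmed:
--             for m in index.get(c, ()):
--                 if m in active:
--                     touched.add(m)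
--         next_confirmed = set()
--         for m in touched:
--             s = possible_keys[m] = possible_keys[m] - confirmed
--             if len(s) <= 1:
--                 active.discard(m)
--                 if len(s) == 1:
--                     next_confirmed |= s
--         confirmed = next_confirmed
--     return possible_keys
-- ===== Notes on version B (the rewrite author's own statement) =====
-- stated objective: alternative
-- what changed: A rescans every dict entry in every fixpoint round; B builds a letter->mappings index and an active set once and then, per round, touches only the mappings that actually contain a letter confirmed in that round.
import Mathlib
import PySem

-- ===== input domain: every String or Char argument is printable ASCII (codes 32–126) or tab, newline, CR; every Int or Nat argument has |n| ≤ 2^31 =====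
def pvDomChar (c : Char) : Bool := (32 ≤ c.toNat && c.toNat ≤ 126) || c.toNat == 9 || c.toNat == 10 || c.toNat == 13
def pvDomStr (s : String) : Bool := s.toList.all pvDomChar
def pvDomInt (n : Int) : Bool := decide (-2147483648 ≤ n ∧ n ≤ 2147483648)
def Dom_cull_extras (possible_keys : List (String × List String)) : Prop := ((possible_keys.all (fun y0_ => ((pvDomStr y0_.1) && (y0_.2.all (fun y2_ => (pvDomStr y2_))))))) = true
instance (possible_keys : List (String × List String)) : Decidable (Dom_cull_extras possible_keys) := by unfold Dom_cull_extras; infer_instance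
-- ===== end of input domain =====

-- B replaces A's fixpoint rescans of the whole dict by a letter→mappings index and a
-- per-round worklist of touched mappings (a different algorithm, similar measured cost);
-- both Pythons mutate the argument dict and return it — the equivalence proved here is
-- about the return value.

-- ===== PORT A =====
-- total number of candidate letters; termination measure of A's while-loop
def pvSize (pk : List (String × List String)) : Nat := (pk.map (fun p => p.2.length)).sum

-- one pass of A's inner `for` loop over the dict items (in insertion order):
-- `possible_keys[mapping] -= confirmed` and the threading of `next_confirmed`
def cullRound : List (String × List String) → List String → PySem.Set String →
    List (String × List String) × PySem.Set String
  | [], _, nc => ([], nc)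
  | (m, ls) :: rest, confirmed, nc =>
    if 1 < ls.length then
      let ls' := PySem.Set.diff ls confirmed
      let nc' := if ls'.length = 1 then PySem.Set.update nc ls' else nc
      let r := cullRound rest confirmed nc'
      ((m, ls') :: r.1, r.2)
    else
      let r := cullRound rest confirmed nc
      ((m, ls) :: r.1, r.2)

-- termination facts for A's `while True` loop (cited in decreasing_by below)
theorem cullRound_size_le (pk : List (String × List String)) (c : List String)
    (nc : PySem.Set String) : pvSize (cullRound pk c nc).1 ≤ pvSize pk := by
  induction pk generalizing nc with
  | nil => simp [cullRound, pvSize]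
  | cons p rest ih =>
    obtain ⟨m, ls⟩ := p
    by_cases h : 1 < ls.length <;>
      simp only [cullRound, h, if_pos, if_neg, pvSize, List.map_cons, List.sum_cons, not_false_iff] <;>
      simp only [pvSize] at ih
    · have hf : (PySem.Set.diff ls c).length ≤ ls.length := by
        unfold PySem.Set.diff; exact List.length_filter_le _ _
      exact Nat.add_le_add hf (ih _)
    · exact Nat.add_le_add_left (ih _) _

theorem cullRound_nc (pk : List (String × List String)) (c : List String)
    (nc : PySem.Set String) :
    (cullRound pk c nc).2 = nc ∨ pvSize (cullRound pk c nc).1 < pvSize pk := by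
  induction pk generalizing nc with
  | nil => exact Or.inl rfl
  | cons p rest ih =>
    obtain ⟨m, ls⟩ := p
    by_cases h : 1 < ls.length
    · by_cases h1 : (PySem.Set.diff ls c).length = 1
      · right
        simp only [cullRound, h, if_pos, h1, pvSize, List.map_cons, List.sum_cons]
        have hrest := cullRound_size_le rest c (PySem.Set.update nc (PySem.Set.diff ls c))
        simp only [pvSize] at hrest
        omega
      · simp only [cullRound, h, if_pos, h1, if_neg, not_false_iff, pvSize,
          List.map_cons, List.sum_cons]
        rcases ih nc with he | hlt
        · exact Or.inl he
        · right
          have hf : (PySem.Set.diff ls c).length ≤ ls.length := by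
            unfold PySem.Set.diff; exact List.length_filter_le _ _
          simp only [pvSize] at hlt; omega
    · simp only [cullRound, h, if_neg, not_false_iff, pvSize, List.map_cons, List.sum_cons]
      rcases ih nc with he | hlt
      · exact Or.inl he
      · right; simp only [pvSize] at hlt; omega

-- A's `while True: … if len(next_confirmed) == 0: break; confirmed = next_confirmed`
def cullLoop (pk : List (String × List String)) (confirmed : PySem.Set String) :
    List (String × List String) :=
  match hr : cullRound pk confirmed [] with
  | (pk', nc) => if nc.length = 0 then pk' else cullLoop pk' nc
termination_by pvSize pk
decreasing_by
  rcases cullRound_nc pk confirmed [] with he | hlt <;> rw [hr] at *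
  · simp_all
  · exact hlt

def cull_extras (possible_keys : List (String × List String)) : List (String × List String) :=
  let confirmed := possible_keys.foldl
    (fun c p => if p.2.length = 1 then PySem.Set.update c p.2 else c) ([] : PySem.Set String)
  cullLoop possible_keys confirmed

-- ===== PORT B =====
-- possible_keys[m]  (m is always a present key when B reads it; [] is a dead default)
def pkGet : List (String × List String) → String → List String
  | [], _ => []
  | p :: rest, m => if p.1 = m then p.2 else pkGet rest m

-- possible_keys[m] = v  (dict assignment: first matching key)
def pkSet : List (String × List String) → String → List String → List (String × List String)
  | [], _, _ => []
  | p :: rest, m, v => if p.1 = m then (p.1, v) :: rest else p :: pkSet rest m v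

-- B's first loop: build (index, active, confirmed) in one pass over the items
def initB (pk : List (String × List String)) :
    PySem.Dict String (List String) × PySem.Set String × PySem.Set String :=
  pk.foldl (fun st p =>
    if p.2.length = 1 then (st.1, st.2.1, PySem.Set.union st.2.2 p.2)
    else if 1 < p.2.length then
      (p.2.foldl (fun ix l => ix.modify l [] (· ++ [p.1])) st.1,
       PySem.Set.add st.2.1 p.1, st.2.2)
    else st)
    (PySem.Dict.empty, ([] : PySem.Set String), ([] : PySem.Set String))

-- `for c in confirmed: for m in index.get(c, ()): if m in active: touched.add(m)`
def touchedOf (index : PySem.Dict String (List String)) (active : PySem.Set String)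
    (confirmed : List String) : PySem.Set String :=
  confirmed.foldl (fun t c => (index.getD c []).foldl
    (fun t m => if PySem.Set.contains active m then PySem.Set.add t m else t) t) []

-- `for m in touched: …` body of B's while-loop, threading (possible_keys, active, next_confirmed)
def roundB (confirmed : List String) :
    List String → List (String × List String) × PySem.Set String × PySem.Set String →
    List (String × List String) × PySem.Set String × PySem.Set String
  | [], st => st
  | m :: rest, (pk, active, nc) =>
    let s := PySem.Set.diff (pkGet pk m) confirmed
    let pk' := pkSet pk m s
    if s.length ≤ 1 then
      roundB confirmed rest (pk', PySem.Set.discard active m,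
        if s.length = 1 then PySem.Set.union nc s else nc)
    else
      roundB confirmed rest (pk', active, nc)

-- termination facts for B's while-loop (cited in decreasing_by below)
theorem pkSet_size_le (pk : List (String × List String)) (m : String) (v : List String)
    (h : v.length ≤ (pkGet pk m).length) : pvSize (pkSet pk m v) ≤ pvSize pk := by
  induction pk with
  | nil => simp [pkSet]
  | cons p rest ih =>
    by_cases hm : p.1 = m <;>
      simp only [pkSet, pkGet, hm, if_pos, if_neg, not_false_iff, pvSize, List.map_cons,
        List.sum_cons] at h ⊢
    · omega
    · have := ih h; simp only [pvSize] at this; omega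

theorem roundB_size_le (confirmed touched : List String)
    (pk : List (String × List String)) (active nc : PySem.Set String) :
    pvSize (roundB confirmed touched (pk, active, nc)).1 ≤ pvSize pk := by
  induction touched generalizing pk active nc with
  | nil => simp [roundB]
  | cons m rest ih =>
    have hd : (PySem.Set.diff (pkGet pk m) confirmed).length ≤ (pkGet pk m).length := by
      unfold PySem.Set.diff; exact List.length_filter_le _ _
    have hset := pkSet_size_le pk m _ hd
    by_cases h : (PySem.Set.diff (pkGet pk m) confirmed).length ≤ 1 <;>
      simp only [roundB, h, if_pos, if_neg, not_false_iff]
    · exact le_trans (ih _ _ _) hset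
    · exact le_trans (ih _ _ _) hset

theorem discard_length_le {α : Type} [BEq α] (s : List α) (x : α) :
    (PySem.Set.discard s x).length ≤ s.length := by
  unfold PySem.Set.discard; exact List.length_filter_le _ _

theorem discard_length_lt (s : List String) (x : String) (h : x ∈ s) :
    (PySem.Set.discard s x).length < s.length := by
  unfold PySem.Set.discard
  induction s with
  | nil => cases h
  | cons a t ih =>
    have hle := List.length_filter_le (fun y => !(y == x)) t
    rcases List.mem_cons.mp h with rfl | ht
    · simp only [List.filter_cons]
      simp
      omega
    · have hlt := ih ht
      by_cases ha : (a == x) = true <;> simp [ha] <;> omega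

theorem roundB_active_le (confirmed touched : List String)
    (pk : List (String × List String)) (active nc : PySem.Set String) :
    (roundB confirmed touched (pk, active, nc)).2.1.length ≤ active.length := by
  induction touched generalizing pk active nc with
  | nil => simp [roundB]
  | cons m rest ih =>
    by_cases h : (PySem.Set.diff (pkGet pk m) confirmed).length ≤ 1 <;>
      simp only [roundB, h, if_pos, if_neg, not_false_iff]
    · exact le_trans (ih _ _ _) (discard_length_le _ _)
    · exact ih _ _ _

theorem roundB_nc_change (confirmed touched : List String)
    (pk : List (String × List String)) (active nc : PySem.Set String)
    (hsub : ∀ m ∈ touched, m ∈ active) (hnd : touched.Nodup)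
    (h : (roundB confirmed touched (pk, active, nc)).2.2 ≠ nc) :
    (roundB confirmed touched (pk, active, nc)).2.1.length < active.length := by
  induction touched generalizing pk active nc with
  | nil => simp [roundB] at h
  | cons m rest ih =>
    have hma : m ∈ active := hsub m (List.mem_cons_self ..)
    have hrest : ∀ m' ∈ rest, m' ∈ active := fun m' hm' => hsub m' (List.mem_cons_of_mem _ hm')
    have hndr : rest.Nodup := hnd.of_cons
    by_cases hle : (PySem.Set.diff (pkGet pk m) confirmed).length ≤ 1
    · simp only [roundB, hle, if_pos] at h ⊢
      exact lt_of_le_of_lt (roundB_active_le _ _ _ _ _) (discard_length_lt active m hma)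
    · simp only [roundB, hle, if_neg, not_false_iff] at h ⊢
      exact ih _ _ _ hrest hndr h

theorem mem_touchedOf_aux (active : PySem.Set String) (l : List String)
    (t : PySem.Set String) (x : String) :
    x ∈ l.foldl (fun t m => if PySem.Set.contains active m then PySem.Set.add t m else t) t ↔
      x ∈ t ∨ (x ∈ l ∧ x ∈ active) := by
  induction l generalizing t with
  | nil => simp
  | cons m rest ih =>
    simp only [List.foldl_cons, ih]
    by_cases hm : PySem.Set.contains active m
    · have hma : m ∈ active := by
        have := PySem.Set.contains_iff (s := active) (x := m); simp_all
      simp only [hm, if_pos, PySem.Set.mem_add, List.mem_cons]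
      constructor
      · rintro ((h | rfl) | h)
        · exact Or.inl h
        · exact Or.inr ⟨Or.inl rfl, hma⟩
        · exact Or.inr ⟨Or.inr h.1, h.2⟩
      · rintro (h | ⟨(rfl | h), ha⟩)
        · exact Or.inl (Or.inl h)
        · exact Or.inl (Or.inr rfl)
        · exact Or.inr ⟨h, ha⟩
    · have hma : x = m → x ∉ active := by
        rintro rfl hx
        exact hm (by have := PySem.Set.contains_iff (s := active) (x := x); simp_all)
      simp only [hm, if_neg, not_false_iff, List.mem_cons]
      constructor
      · rintro (h | h)
        · exact Or.inl h
        · exact Or.inr ⟨Or.inr h.1, h.2⟩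
      · rintro (h | ⟨(rfl | h), ha⟩)
        · exact Or.inl h
        · exact absurd ha (hma rfl)
        · exact Or.inr ⟨h, ha⟩

theorem mem_touchedOf (index : PySem.Dict String (List String)) (active : PySem.Set String)
    (confirmed : List String) (x : String) :
    x ∈ touchedOf index active confirmed ↔
      x ∈ active ∧ ∃ c ∈ confirmed, x ∈ index.getD c [] := by
  unfold touchedOf
  have gen : ∀ (t : PySem.Set String),
      x ∈ confirmed.foldl (fun t c => (index.getD c []).foldl
        (fun t m => if PySem.Set.contains active m then PySem.Set.add t m else t) t) t ↔
      x ∈ t ∨ (x ∈ active ∧ ∃ c ∈ confirmed, x ∈ index.getD c []) := by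
    induction confirmed with
    | nil => simp
    | cons c rest ih =>
      intro t
      simp only [List.foldl_cons, ih, mem_touchedOf_aux, List.mem_cons]
      constructor
      · rintro ((h | h) | h)
        · exact Or.inl h
        · exact Or.inr ⟨h.2, c, Or.inl rfl, h.1⟩
        · exact Or.inr ⟨h.1, h.2.choose, Or.inr h.2.choose_spec.1, h.2.choose_spec.2⟩
      · rintro (h | ⟨ha, c', (rfl | hc), hx⟩)
        · exact Or.inl (Or.inl h)
        · exact Or.inl (Or.inr ⟨hx, ha⟩)
        · exact Or.inr ⟨ha, c', hc, hx⟩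
  exact (gen []).trans (by simp)

theorem touchedOf_nodup_aux (active : PySem.Set String) (l : List String)
    (t : PySem.Set String) (ht : t.Nodup) :
    (l.foldl (fun t m => if PySem.Set.contains active m then PySem.Set.add t m else t) t).Nodup := by
  induction l generalizing t with
  | nil => exact ht
  | cons m rest ih =>
    simp only [List.foldl_cons]
    by_cases hm : PySem.Set.contains active m <;>
      simp only [hm, if_pos, if_neg, not_false_iff]
    · exact ih _ (PySem.Set.nodup_add _ _ ht)
    · exact ih _ ht

theorem touchedOf_nodup (index : PySem.Dict String (List String)) (active : PySem.Set String)
    (confirmed : List String) : (touchedOf index active confirmed).Nodup := by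
  unfold touchedOf
  have gen : ∀ (t : PySem.Set String), t.Nodup →
      (confirmed.foldl (fun t c => (index.getD c []).foldl
        (fun t m => if PySem.Set.contains active m then PySem.Set.add t m else t) t) t).Nodup := by
    induction confirmed with
    | nil => exact fun t ht => ht
    | cons c rest ih =>
      intro t ht
      exact ih _ (touchedOf_nodup_aux active _ t ht)
  exact gen [] List.nodup_nil

-- B's `while confirmed:` loop
def cullLoopB (pk : List (String × List String)) (index : PySem.Dict String (List String))
    (active confirmed : PySem.Set String) : List (String × List String) :=
  if confirmed = [] then pk
  else
    let touched := touchedOf index active confirmed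
    let st := roundB confirmed touched (pk, active, [])
    cullLoopB st.1 index st.2.1 st.2.2
termination_by (pvSize pk + active.length, confirmed.length)
decreasing_by
  rename_i hne
  by_cases hnc : (roundB confirmed (touchedOf index active confirmed) (pk, active, [])).2.2 = []
  · apply Prod.Lex.right'
    · have h1 := roundB_size_le confirmed (touchedOf index active confirmed) pk active []
      have h2 := roundB_active_le confirmed (touchedOf index active confirmed) pk active []
      omega
    · rw [hnc]
      simp only [List.length_nil]
      exact List.length_pos_iff.mpr hne
  · apply Prod.Lex.left
    have h1 := roundB_size_le confirmed (touchedOf index active confirmed) pk active []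
    have h2 := roundB_nc_change confirmed (touchedOf index active confirmed) pk active []
      (fun m hm => ((mem_touchedOf index active confirmed m).mp hm).1)
      (touchedOf_nodup index active confirmed) hnc
    omega

def cull_extras_alt (possible_keys : List (String × List String)) :
    List (String × List String) :=
  let st := initB possible_keys
  cullLoopB possible_keys st.1 st.2.1 st.2.2

-- ===== PRECONDITION & SPEC =====
-- Pre_ says the association list is the image of A's actual argument, a Python
-- dict[str, set[str]]: the keys are pairwise distinct and each value list holds
-- distinct elements. (A list with a repeated key or a repeated set element does not
-- correspond to any Python input of A.)
def Pre_cull_extras (possible_keys : List (String × List String)) : Prop :=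
  (possible_keys.map Prod.fst).Nodup ∧ ∀ p ∈ possible_keys, p.2.Nodup
instance (possible_keys : List (String × List String)) : Decidable (Pre_cull_extras possible_keys) := by
  unfold Pre_cull_extras; infer_instance

def pvWitness_cull_extras : (List (String × List String)) :=
  [("ab", ["x"]), ("cd", ["x", "y"]), ("ef", ["y", "z", "w"])]

def Spec_cull_extras (possible_keys : List (String × List String)) (out : List (String × List String)) : Prop := out = cull_extras_alt possible_keys
instance (possible_keys : List (String × List String)) (out : List (String × List String)) : Decidable (Spec_cull_extras possible_keys out) := by unfold Spec_cull_extras; infer_instance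

-- ===== CLAIM (what is proved, stated in full; the proofs are below) =====
def Claim_equal_cull_extras : Prop := ∀ (possible_keys : List (String × List String)), Dom_cull_extras possible_keys → Pre_cull_extras possible_keys → Spec_cull_extras possible_keys (cull_extras possible_keys)

-- ===== LEMMAS AND PROOFS =====

-- basic facts about set difference (a filter)
theorem diff_congr (ls c1 c2 : List String) (h : ∀ x, x ∈ c1 ↔ x ∈ c2) :
    PySem.Set.diff ls c1 = PySem.Set.diff ls c2 := by
  unfold PySem.Set.diff
  refine List.filter_congr (fun a _ => ?_)
  have := h a
  by_cases ha : a ∈ c1 <;> simp_all [PySem.Set.contains]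

theorem diff_of_disjoint (ls c : List String) (h : ∀ a ∈ ls, a ∉ c) :
    PySem.Set.diff ls c = ls := by
  unfold PySem.Set.diff
  refine List.filter_eq_self.mpr (fun a ha => ?_)
  have := h a ha
  simp_all [PySem.Set.contains]

theorem diff_ne_exists (ls c : List String) (h : PySem.Set.diff ls c ≠ ls) :
    ∃ a ∈ ls, a ∈ c := by
  by_contra hno
  push_neg at hno
  exact h (diff_of_disjoint ls c hno)

theorem diff_nil (ls : List String) : PySem.Set.diff ls [] = ls :=
  diff_of_disjoint ls [] (by simp)

-- keys / lookups of the association list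
theorem key_unique (pk : List (String × List String)) (hkeys : (pk.map Prod.fst).Nodup)
    (p q : String × List String) (hp : p ∈ pk) (hq : q ∈ pk) (h : p.1 = q.1) : p = q :=
  List.inj_on_of_nodup_map hkeys hp hq h

theorem pkGet_of_mem (pk : List (String × List String)) (hkeys : (pk.map Prod.fst).Nodup)
    (p : String × List String) (hp : p ∈ pk) : pkGet pk p.1 = p.2 := by
  induction pk with
  | nil => cases hp
  | cons q rest ih =>
    rcases List.mem_cons.mp hp with rfl | hp'
    · simp [pkGet]
    · have hne : q.1 ≠ p.1 := by
        intro he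
        have : p.1 ∈ rest.map Prod.fst := List.mem_map_of_mem hp'
        rw [← he] at this
        simp only [List.map_cons, List.nodup_cons] at hkeys
        exact hkeys.1 this
      simp only [pkGet, hne, if_neg, not_false_iff]
      exact ih (by simp_all) hp'

theorem mem_pkGet (pk : List (String × List String)) (m : String)
    (hm : m ∈ pk.map Prod.fst) : (m, pkGet pk m) ∈ pk := by
  induction pk with
  | nil => simp at hm
  | cons q rest ih =>
    by_cases hq : q.1 = m
    · simp only [pkGet, hq, if_pos]
      exact List.mem_cons.mpr (Or.inl (by rw [← hq]))
    · simp only [List.map_cons, List.mem_cons] at hm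
      rcases hm with h | h
      · exact absurd h.symm hq
      · simp only [pkGet, hq, if_neg, not_false_iff]
        exact List.mem_cons_of_mem _ (ih h)

theorem keys_pkSet (pk : List (String × List String)) (m : String) (v : List String) :
    (pkSet pk m v).map Prod.fst = pk.map Prod.fst := by
  induction pk with
  | nil => rfl
  | cons p rest ih =>
    by_cases hp : p.1 = m <;> simp [pkSet, hp, ih]

theorem pkGet_pkSet_diff (pk : List (String × List String)) (m : String)
    (conf : List String) (x : String) :
    pkGet (pkSet pk m (PySem.Set.diff (pkGet pk m) conf)) x =
      if x = m then PySem.Set.diff (pkGet pk m) conf else pkGet pk x := by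
  induction pk with
  | nil =>
    simp only [pkSet, pkGet]
    by_cases hx : x = m <;> simp [hx, PySem.Set.diff]
  | cons p rest ih =>
    by_cases hp : p.1 = m
    · have hget : pkGet (p :: rest) m = p.2 := by simp [pkGet, hp]
      rw [hget]
      simp only [pkSet, hp, if_pos]
      by_cases hx : x = m
      · have hpx : p.1 = x := by rw [hp, hx]
        simp [pkGet, hpx, hx]
      · have hpx : ¬ p.1 = x := fun h => hx (by rw [← h, hp])
        have hmx : ¬ m = x := fun h => hx h.symm
        simp [pkGet, hpx, hx, hmx]
    · have hget : pkGet (p :: rest) m = pkGet rest m := by simp [pkGet, hp]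
      rw [hget]
      simp only [pkSet, hp, if_neg, not_false_iff]
      by_cases hpx : p.1 = x
      · have hx : ¬ x = m := fun h => hp (by rw [hpx, h])
        simp [pkGet, hpx, hx]
      · simp only [pkGet, hpx, if_neg, not_false_iff]
        exact ih

-- pk-component of B's round, as the canonical map over the items
theorem roundB_fst_aux (conf : List String) (rest : List String) (m : String)
    (pk : List (String × List String)) (hkeys : (pk.map Prod.fst).Nodup)
    (hm : m ∉ rest) :
    (pkSet pk m (PySem.Set.diff (pkGet pk m) conf)).map
        (fun p => if p.1 ∈ rest then (p.1, PySem.Set.diff p.2 conf) else p) =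
      pk.map (fun p => if p.1 ∈ m :: rest then (p.1, PySem.Set.diff p.2 conf) else p) := by
  induction pk with
  | nil => rfl
  | cons q pkrest ih =>
    simp only [List.map_cons, List.nodup_cons] at hkeys
    by_cases hq : q.1 = m
    · have hget : pkGet (q :: pkrest) m = q.2 := by simp [pkGet, hq]
      rw [hget]
      simp only [pkSet, hq, if_pos, List.map_cons]
      rw [if_neg hm, if_pos (List.mem_cons_self ..)]
      congr 1
      refine List.map_congr_left (fun p hp => ?_)
      have hpne : p.1 ≠ m := by
        intro he
        apply hkeys.1
        rw [hq, ← he]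
        exact List.mem_map_of_mem hp
      simp [List.mem_cons, hpne]
    · have hget : pkGet (q :: pkrest) m = pkGet pkrest m := by simp [pkGet, hq]
      rw [hget]
      simp only [pkSet, hq, if_neg, not_false_iff, List.map_cons]
      rw [ih hkeys.2]
      congr 1
      by_cases hqr : q.1 ∈ rest <;> simp [List.mem_cons, hq, hqr]

theorem roundB_fst (conf : List String) (touched : List String)
    (pk : List (String × List String)) (active nc : PySem.Set String)
    (hnd : touched.Nodup) (hkeys : (pk.map Prod.fst).Nodup) :
    (roundB conf touched (pk, active, nc)).1 =
      pk.map (fun p => if p.1 ∈ touched then (p.1, PySem.Set.diff p.2 conf) else p) := by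
  induction touched generalizing pk active nc with
  | nil =>
    have h0 : roundB conf [] (pk, active, nc) = (pk, active, nc) := rfl
    rw [h0]
    simp
  | cons m rest ih =>
    have hkeys' : ((pkSet pk m (PySem.Set.diff (pkGet pk m) conf)).map Prod.fst).Nodup := by
      rw [keys_pkSet]; exact hkeys
    have hm : m ∉ rest := by simp_all
    by_cases hle : (PySem.Set.diff (pkGet pk m) conf).length ≤ 1 <;>
      simp only [roundB, hle, if_pos, if_neg, not_false_iff] <;>
      rw [ih _ _ _ hnd.of_cons hkeys', roundB_fst_aux conf rest m pk hkeys hm]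

-- active-component of B's round
theorem roundB_active_mem (conf : List String) (touched : List String)
    (pk : List (String × List String)) (active nc : PySem.Set String)
    (hnd : touched.Nodup) (x : String) :
    (x ∈ (roundB conf touched (pk, active, nc)).2.1 ↔
      x ∈ active ∧ ¬(x ∈ touched ∧ (PySem.Set.diff (pkGet pk x) conf).length ≤ 1)) := by
  induction touched generalizing pk active nc with
  | nil =>
    have h0 : roundB conf [] (pk, active, nc) = (pk, active, nc) := rfl
    rw [h0]
    simp
  | cons m rest ih =>
    have hm : m ∉ rest := by simp_all
    have hpkget : ∀ y, y ∈ rest →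
        pkGet (pkSet pk m (PySem.Set.diff (pkGet pk m) conf)) y = pkGet pk y := by
      intro y hy
      rw [pkGet_pkSet_diff]
      have : ¬ y = m := fun h => hm (h ▸ hy)
      simp [this]
    by_cases hle : (PySem.Set.diff (pkGet pk m) conf).length ≤ 1
    · simp only [roundB, hle, if_pos, ih _ _ _ hnd.of_cons, PySem.Set.mem_discard]
      constructor
      · rintro ⟨⟨hxa, hxm⟩, hrest⟩
        refine ⟨hxa, ?_⟩
        rintro ⟨hxt, hlen⟩
        rcases List.mem_cons.mp hxt with rfl | hxr
        · exact hxm rfl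
        · rw [← hpkget x hxr] at hlen
          exact hrest ⟨hxr, hlen⟩
      · rintro ⟨hxa, hno⟩
        have hxm : x ≠ m := by
          rintro rfl
          exact hno ⟨List.mem_cons_self .., hle⟩
        refine ⟨⟨hxa, hxm⟩, ?_⟩
        rintro ⟨hxr, hlen⟩
        rw [hpkget x hxr] at hlen
        exact hno ⟨List.mem_cons_of_mem _ hxr, hlen⟩
    · simp only [roundB, hle, if_neg, not_false_iff, ih _ _ _ hnd.of_cons]
      constructor
      · rintro ⟨hxa, hrest⟩
        refine ⟨hxa, ?_⟩
        rintro ⟨hxt, hlen⟩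
        rcases List.mem_cons.mp hxt with rfl | hxr
        · exact hle hlen
        · rw [← hpkget x hxr] at hlen
          exact hrest ⟨hxr, hlen⟩
      · rintro ⟨hxa, hno⟩
        refine ⟨hxa, ?_⟩
        rintro ⟨hxr, hlen⟩
        rw [hpkget x hxr] at hlen
        exact hno ⟨List.mem_cons_of_mem _ hxr, hlen⟩

-- one step of B's `for m in touched` loop, with the branching pushed into the state
theorem roundB_cons (conf : List String) (m : String) (rest : List String)
    (pk : List (String × List String)) (active nc : PySem.Set String) :
    roundB conf (m :: rest) (pk, active, nc) =
      roundB conf rest (pkSet pk m (PySem.Set.diff (pkGet pk m) conf),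
        if (PySem.Set.diff (pkGet pk m) conf).length ≤ 1
          then PySem.Set.discard active m else active,
        if (PySem.Set.diff (pkGet pk m) conf).length = 1
          then PySem.Set.union nc (PySem.Set.diff (pkGet pk m) conf) else nc) := by
  by_cases hle : (PySem.Set.diff (pkGet pk m) conf).length ≤ 1
  · simp [roundB, hle]
  · have h1 : ¬ (PySem.Set.diff (pkGet pk m) conf).length = 1 := fun h => hle (le_of_eq h)
    simp [roundB, hle, h1]

-- next_confirmed-component of B's round
theorem roundB_nc_mem (conf : List String) (touched : List String)
    (pk : List (String × List String)) (active nc : PySem.Set String)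
    (hnd : touched.Nodup) (x : String) :
    (x ∈ (roundB conf touched (pk, active, nc)).2.2 ↔
      x ∈ nc ∨ ∃ m ∈ touched, (PySem.Set.diff (pkGet pk m) conf).length = 1 ∧
        x ∈ PySem.Set.diff (pkGet pk m) conf) := by
  induction touched generalizing pk active nc with
  | nil =>
    have h0 : roundB conf [] (pk, active, nc) = (pk, active, nc) := rfl
    rw [h0]
    simp
  | cons m rest ih =>
    have hm : m ∉ rest := by simp_all
    have hpkget : ∀ y, y ∈ rest →
        pkGet (pkSet pk m (PySem.Set.diff (pkGet pk m) conf)) y = pkGet pk y := by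
      intro y hy
      rw [pkGet_pkSet_diff]
      have : ¬ y = m := fun h => hm (h ▸ hy)
      simp [this]
    rw [roundB_cons, ih _ _ _ hnd.of_cons]
    have hrw : (∃ y ∈ rest,
        (PySem.Set.diff (pkGet (pkSet pk m (PySem.Set.diff (pkGet pk m) conf)) y) conf).length = 1 ∧
          x ∈ PySem.Set.diff (pkGet (pkSet pk m (PySem.Set.diff (pkGet pk m) conf)) y) conf) ↔
        (∃ y ∈ rest, (PySem.Set.diff (pkGet pk y) conf).length = 1 ∧
          x ∈ PySem.Set.diff (pkGet pk y) conf) := by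
      constructor <;> rintro ⟨y, hy, h1, h2⟩ <;> refine ⟨y, hy, ?_, ?_⟩
      · rwa [hpkget y hy] at h1
      · rwa [hpkget y hy] at h2
      · rwa [hpkget y hy]
      · rwa [hpkget y hy]
    rw [hrw]
    have hsplit : (∃ y ∈ m :: rest, (PySem.Set.diff (pkGet pk y) conf).length = 1 ∧
        x ∈ PySem.Set.diff (pkGet pk y) conf) ↔
        (((PySem.Set.diff (pkGet pk m) conf).length = 1 ∧ x ∈ PySem.Set.diff (pkGet pk m) conf) ∨
        (∃ y ∈ rest, (PySem.Set.diff (pkGet pk y) conf).length = 1 ∧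
          x ∈ PySem.Set.diff (pkGet pk y) conf)) := by
      constructor
      · rintro ⟨y, hy, h1, h2⟩
        rcases List.mem_cons.mp hy with rfl | hyr
        · exact Or.inl ⟨h1, h2⟩
        · exact Or.inr ⟨y, hyr, h1, h2⟩
      · rintro (⟨h1, h2⟩ | ⟨y, hyr, h1, h2⟩)
        · exact ⟨m, List.mem_cons_self .., h1, h2⟩
        · exact ⟨y, List.mem_cons_of_mem _ hyr, h1, h2⟩
    rw [hsplit]
    by_cases h1 : (PySem.Set.diff (pkGet pk m) conf).length = 1
    · rw [if_pos h1]
      simp only [PySem.Set.mem_union]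
      constructor
      · rintro ((h | h) | h)
        · exact Or.inl h
        · exact Or.inr (Or.inl ⟨h1, h⟩)
        · exact Or.inr (Or.inr h)
      · rintro (h | (⟨_, h⟩ | h))
        · exact Or.inl (Or.inl h)
        · exact Or.inl (Or.inr h)
        · exact Or.inr h
    · rw [if_neg h1]
      constructor
      · rintro (h | h)
        · exact Or.inl h
        · exact Or.inr (Or.inr h)
      · rintro (h | (⟨hh, _⟩ | h))
        · exact Or.inl h
        · exact absurd hh h1
        · exact Or.inr h

theorem roundB_nc_nodup (conf : List String) (touched : List String)
    (pk : List (String × List String)) (active nc : PySem.Set String)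
    (hnc : nc.Nodup) : (roundB conf touched (pk, active, nc)).2.2.Nodup := by
  induction touched generalizing pk active nc with
  | nil => exact hnc
  | cons m rest ih =>
    rw [roundB_cons]
    by_cases h1 : (PySem.Set.diff (pkGet pk m) conf).length = 1
    · rw [if_pos h1]
      exact ih _ _ _ (PySem.Set.nodup_union _ _ hnc)
    · rw [if_neg h1]
      exact ih _ _ _ hnc

-- A's round, as the canonical map over the items plus a membership description
theorem cullRound_fst (pk : List (String × List String)) (conf : List String)
    (nc : PySem.Set String) :
    (cullRound pk conf nc).1 =
      pk.map (fun p => if 1 < p.2.length then (p.1, PySem.Set.diff p.2 conf) else p) := by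
  induction pk generalizing nc with
  | nil => rfl
  | cons p rest ih =>
    obtain ⟨m, ls⟩ := p
    by_cases h : 1 < ls.length <;>
      simp [cullRound, h, ih]

theorem cullRound_snd_mem (pk : List (String × List String)) (conf : List String)
    (nc : PySem.Set String) (x : String) :
    (x ∈ (cullRound pk conf nc).2 ↔
      x ∈ nc ∨ ∃ p ∈ pk, 1 < p.2.length ∧ (PySem.Set.diff p.2 conf).length = 1 ∧
        x ∈ PySem.Set.diff p.2 conf) := by
  induction pk generalizing nc with
  | nil => simp [cullRound]
  | cons p rest ih =>
    obtain ⟨m, ls⟩ := p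
    by_cases h : 1 < ls.length
    · by_cases h1 : (PySem.Set.diff ls conf).length = 1
      · simp only [cullRound, h, if_pos, h1, ih, PySem.Set.mem_update, List.mem_cons]
        constructor
        · rintro ((hx | hx) | ⟨q, hq, hq1, hq2, hq3⟩)
          · exact Or.inl hx
          · exact Or.inr ⟨(m, ls), Or.inl rfl, h, h1, hx⟩
          · exact Or.inr ⟨q, Or.inr hq, hq1, hq2, hq3⟩
        · rintro (hx | ⟨q, (rfl | hq), hq1, hq2, hq3⟩)
          · exact Or.inl (Or.inl hx)
          · exact Or.inl (Or.inr hq3)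
          · exact Or.inr ⟨q, hq, hq1, hq2, hq3⟩
      · simp only [cullRound, h, if_pos, h1, if_neg, not_false_iff, ih, List.mem_cons]
        constructor
        · rintro (hx | ⟨q, hq, hq1, hq2, hq3⟩)
          · exact Or.inl hx
          · exact Or.inr ⟨q, Or.inr hq, hq1, hq2, hq3⟩
        · rintro (hx | ⟨q, (rfl | hq), hq1, hq2, hq3⟩)
          · exact Or.inl hx
          · exact absurd hq2 h1
          · exact Or.inr ⟨q, hq, hq1, hq2, hq3⟩
    · simp only [cullRound, h, if_neg, not_false_iff, ih, List.mem_cons]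
      constructor
      · rintro (hx | ⟨q, hq, hq1, hq2, hq3⟩)
        · exact Or.inl hx
        · exact Or.inr ⟨q, Or.inr hq, hq1, hq2, hq3⟩
      · rintro (hx | ⟨q, (rfl | hq), hq1, hq2, hq3⟩)
        · exact Or.inl hx
        · exact absurd hq1 h
        · exact Or.inr ⟨q, hq, hq1, hq2, hq3⟩

theorem cullRound_snd_nodup (pk : List (String × List String)) (conf : List String)
    (nc : PySem.Set String) (hnc : nc.Nodup) : (cullRound pk conf nc).2.Nodup := by
  induction pk generalizing nc with
  | nil => exact hnc
  | cons p rest ih =>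
    obtain ⟨m, ls⟩ := p
    by_cases h : 1 < ls.length <;>
      by_cases h1 : (PySem.Set.diff ls conf).length = 1 <;>
      simp only [cullRound, h, h1, if_pos, if_neg, not_false_iff] <;>
      first
        | exact ih _ (PySem.Set.nodup_update _ _ hnc)
        | exact ih _ hnc

-- unfolding equations for the two while-loops
theorem cullLoop_eq (pk : List (String × List String)) (confirmed : PySem.Set String) :
    cullLoop pk confirmed =
      if (cullRound pk confirmed []).2.length = 0 then (cullRound pk confirmed []).1
      else cullLoop (cullRound pk confirmed []).1 (cullRound pk confirmed []).2 := by
  rw [cullLoop]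

theorem cullLoopB_eq (pk : List (String × List String)) (index : PySem.Dict String (List String))
    (active confirmed : PySem.Set String) :
    cullLoopB pk index active confirmed =
      if confirmed = [] then pk
      else
        cullLoopB (roundB confirmed (touchedOf index active confirmed) (pk, active, [])).1 index
          (roundB confirmed (touchedOf index active confirmed) (pk, active, [])).2.1
          (roundB confirmed (touchedOf index active confirmed) (pk, active, [])).2.2 := by
  rw [cullLoopB]

theorem cullLoopB_nil (pk : List (String × List String)) (index : PySem.Dict String (List String))
    (active : PySem.Set String) : cullLoopB pk index active [] = pk := by
  rw [cullLoopB_eq]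
  simp

-- the loops agree, one round at a time
theorem main_loop_eq (n : Nat) (pk : List (String × List String))
    (index : PySem.Dict String (List String)) (active cA cB : PySem.Set String)
    (hn : pvSize pk + active.length ≤ n)
    (hkeys : (pk.map Prod.fst).Nodup)
    (hA : cA.Nodup) (hB : cB.Nodup) (hc : ∀ x, x ∈ cA ↔ x ∈ cB)
    (hsub : ∀ m ∈ active, m ∈ pk.map Prod.fst)
    (hact : ∀ p ∈ pk, (p.1 ∈ active ↔ 1 < p.2.length))
    (hidx : ∀ p ∈ pk, p.1 ∈ active → ∀ c ∈ p.2, p.1 ∈ index.getD c []) :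
    cullLoop pk cA = cullLoopB pk index active cB := by
  by_cases hB0 : cB = []
  · subst hB0
    have hcA : cA = [] := by
      rw [List.eq_nil_iff_forall_not_mem]
      intro x hx
      exact (List.not_mem_nil (a := x)).elim ((hc x).mp hx)
    subst hcA
    rw [cullLoopB_nil]
    have hr1 : (cullRound pk [] []).1 = pk := by
      rw [cullRound_fst]
      have hpt : ∀ p ∈ pk, (if 1 < p.2.length then (p.1, PySem.Set.diff p.2 []) else p) = p := by
        intro p _
        rw [diff_nil]
        split <;> rfl
      rw [List.map_congr_left hpt]
      simp
    have hr2 : (cullRound pk [] []).2 = [] := by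
      rw [List.eq_nil_iff_forall_not_mem]
      intro x hx
      rw [cullRound_snd_mem] at hx
      rcases hx with hx | ⟨p, _, h1, h2, _⟩
      · simp at hx
      · rw [diff_nil] at h2
        omega
    rw [cullLoop_eq, hr2, hr1]
    simp
  · -- one round on each side
    have htn := touchedOf_nodup index active cB
    have htsub : ∀ m ∈ touchedOf index active cB, m ∈ active :=
      fun m hm => ((mem_touchedOf index active cB m).mp hm).1
    have hAfst := cullRound_fst pk cA []
    have hBfst := roundB_fst cB (touchedOf index active cB) pk active [] htn hkeys
    -- the two per-round item maps agree
    have hfst : (cullRound pk cA []).1 =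
        (roundB cB (touchedOf index active cB) (pk, active, [])).1 := by
      rw [hAfst, hBfst]
      refine List.map_congr_left (fun p hp => ?_)
      have hdc : PySem.Set.diff p.2 cA = PySem.Set.diff p.2 cB := diff_congr _ _ _ hc
      by_cases hl : 1 < p.2.length
      · by_cases ht : p.1 ∈ touchedOf index active cB
        · rw [if_pos hl, if_pos ht, hdc]
        · have hdis : ∀ a ∈ p.2, a ∉ cB := by
            intro a ha hacB
            exact ht ((mem_touchedOf index active cB p.1).mpr
              ⟨(hact p hp).mpr hl, a, hacB, hidx p hp ((hact p hp).mpr hl) a ha⟩)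
          rw [if_pos hl, if_neg ht, hdc, diff_of_disjoint _ _ hdis]
      · have hna : p.1 ∉ active := fun h => hl ((hact p hp).mp h)
        have ht : p.1 ∉ touchedOf index active cB := fun h => hna (htsub _ h)
        rw [if_neg hl, if_neg ht]
    -- memberships of the two next_confirmed sets agree
    have hnc : ∀ x, x ∈ (cullRound pk cA []).2 ↔
        x ∈ (roundB cB (touchedOf index active cB) (pk, active, [])).2.2 := by
      intro x
      rw [cullRound_snd_mem, roundB_nc_mem _ _ _ _ _ htn]
      simp only [List.not_mem_nil, false_or]
      constructor
      · rintro ⟨p, hp, h1, h2, h3⟩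
        have hdc : PySem.Set.diff p.2 cA = PySem.Set.diff p.2 cB := diff_congr _ _ _ hc
        have hne : PySem.Set.diff p.2 cB ≠ p.2 := by
          intro he
          rw [hdc, he] at h2
          omega
        obtain ⟨c, hcp, hccB⟩ := diff_ne_exists _ _ hne
        have hpa : p.1 ∈ active := (hact p hp).mpr h1
        have ht : p.1 ∈ touchedOf index active cB := (mem_touchedOf index active cB p.1).mpr
          ⟨hpa, c, hccB, hidx p hp hpa c hcp⟩
        have hg : pkGet pk p.1 = p.2 := pkGet_of_mem pk hkeys p hp
        refine ⟨p.1, ht, ?_, ?_⟩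
        · rw [hg, ← hdc]; exact h2
        · rw [hg, ← hdc]; exact h3
      · rintro ⟨m, hmt, h2, h3⟩
        have hma : m ∈ active := htsub m hmt
        have hp := mem_pkGet pk m (hsub m hma)
        have h1 : 1 < (pkGet pk m).length := (hact _ hp).mp hma
        have hdc : PySem.Set.diff (pkGet pk m) cA = PySem.Set.diff (pkGet pk m) cB :=
          diff_congr _ _ _ hc
        refine ⟨(m, pkGet pk m), hp, h1, ?_, ?_⟩
        · rw [hdc]; exact h2
        · rw [hdc]; exact h3
    rw [cullLoop_eq, cullLoopB_eq, if_neg hB0]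
    by_cases hempty : (cullRound pk cA []).2.length = 0
    · rw [if_pos hempty]
      have hncA : (cullRound pk cA []).2 = [] := List.length_eq_zero_iff.mp hempty
      have hncB : (roundB cB (touchedOf index active cB) (pk, active, [])).2.2 = [] := by
        rw [List.eq_nil_iff_forall_not_mem]
        intro x hx
        have := (hnc x).mpr hx
        rw [hncA] at this
        simp at this
      rw [hncB, cullLoopB_nil]
      exact hfst
    · rw [if_neg hempty]
      have hncAne : (cullRound pk cA []).2 ≠ [] := by
        intro h
        rw [h] at hempty
        simp at hempty
      have hncBne : (roundB cB (touchedOf index active cB) (pk, active, [])).2.2 ≠ [] := by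
        intro h
        obtain ⟨x, hx⟩ := List.exists_mem_of_ne_nil _ hncAne
        have := (hnc x).mp hx
        rw [h] at this
        simp at this
      -- the measure strictly decreases
      have hsz := roundB_size_le cB (touchedOf index active cB) pk active []
      have hal := roundB_nc_change cB (touchedOf index active cB) pk active [] htsub htn hncBne
      have hnpos : 0 < n := by omega
      rw [hfst]
      -- invariants for the next round
      have hkeys2 : ((roundB cB (touchedOf index active cB) (pk, active, [])).1.map Prod.fst).Nodup := by
        rw [hBfst, List.map_map]
        have : pk.map (Prod.fst ∘ fun p =>
            if p.1 ∈ touchedOf index active cB then (p.1, PySem.Set.diff p.2 cB) else p) =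
            pk.map Prod.fst := by
          refine List.map_congr_left (fun p _ => ?_)
          by_cases ht : p.1 ∈ touchedOf index active cB <;> simp [ht]
        rw [this]
        exact hkeys
      refine main_loop_eq (n - 1) _ index _ _ _ (by omega) hkeys2
        (cullRound_snd_nodup pk cA [] List.nodup_nil)
        (roundB_nc_nodup cB (touchedOf index active cB) pk active [] List.nodup_nil)
        hnc ?_ ?_ ?_
      · -- active' still within the keys
        intro m hm
        have hma : m ∈ active :=
          ((roundB_active_mem cB (touchedOf index active cB) pk active [] htn m).mp hm).1
        rw [hBfst, List.map_map]
        have : pk.map (Prod.fst ∘ fun p =>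
            if p.1 ∈ touchedOf index active cB then (p.1, PySem.Set.diff p.2 cB) else p) =
            pk.map Prod.fst := by
          refine List.map_congr_left (fun p _ => ?_)
          by_cases ht : p.1 ∈ touchedOf index active cB <;> simp [ht]
        rw [this]
        exact hsub m hma
      · -- active' describes exactly the still-multi-letter entries
        intro q hq
        rw [hBfst] at hq
        obtain ⟨p, hp, rfl⟩ := List.mem_map.mp hq
        rw [roundB_active_mem cB (touchedOf index active cB) pk active [] htn]
        have hg : pkGet pk p.1 = p.2 := pkGet_of_mem pk hkeys p hp
        by_cases ht : p.1 ∈ touchedOf index active cB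
        · have hpa : p.1 ∈ active := htsub _ ht
          rw [if_pos ht]
          constructor
          · rintro ⟨-, hno⟩
            have h2 : ¬((PySem.Set.diff (pkGet pk p.1) cB).length ≤ 1) := fun h => hno ⟨ht, h⟩
            rw [hg] at h2
            show 1 < (PySem.Set.diff p.2 cB).length
            omega
          · intro hlen
            refine ⟨hpa, ?_⟩
            rintro ⟨-, hle⟩
            rw [hg] at hle
            have h2 : 1 < (PySem.Set.diff p.2 cB).length := hlen
            omega
        · rw [if_neg ht]
          constructor
          · rintro ⟨hpa, -⟩
            exact (hact p hp).mp hpa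
          · intro hlen
            refine ⟨(hact p hp).mpr hlen, ?_⟩
            rintro ⟨hxt, -⟩
            exact ht hxt
      · -- index still covers every letter of every active entry
        intro q hq hqa c hc2
        rw [hBfst] at hq
        obtain ⟨p, hp, rfl⟩ := List.mem_map.mp hq
        have hpa' : (if p.1 ∈ touchedOf index active cB then (p.1, PySem.Set.diff p.2 cB) else p).1
            ∈ active := by
          have := (roundB_active_mem cB (touchedOf index active cB) pk active [] htn _).mp hqa
          exact this.1
        by_cases ht : p.1 ∈ touchedOf index active cB
        · rw [if_pos ht] at hc2 hpa' ⊢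
          exact hidx p hp hpa' c ((PySem.Set.mem_diff _ _ _).mp hc2).1
        · rw [if_neg ht] at hc2 hpa' ⊢
          exact hidx p hp hpa' c hc2
termination_by n
decreasing_by omega

-- B's init loop computes its three accumulators independently
theorem initB_split (pk : List (String × List String))
    (ix : PySem.Dict String (List String)) (ac cf : PySem.Set String) :
    pk.foldl (fun st p =>
      if p.2.length = 1 then (st.1, st.2.1, PySem.Set.union st.2.2 p.2)
      else if 1 < p.2.length then
        (p.2.foldl (fun i l => i.modify l [] (· ++ [p.1])) st.1,
         PySem.Set.add st.2.1 p.1, st.2.2)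
      else st) (ix, ac, cf) =
    (pk.foldl (fun i p => if p.2.length = 1 then i
        else if 1 < p.2.length then p.2.foldl (fun i l => i.modify l [] (· ++ [p.1])) i
        else i) ix,
     pk.foldl (fun a p => if p.2.length = 1 then a
        else if 1 < p.2.length then PySem.Set.add a p.1 else a) ac,
     pk.foldl (fun c p => if p.2.length = 1 then PySem.Set.union c p.2 else c) cf) := by
  induction pk generalizing ix ac cf with
  | nil => rfl
  | cons p rest ih =>
    simp only [List.foldl_cons]
    by_cases h1 : p.2.length = 1
    · simp only [h1, if_pos]
      exact ih _ _ _
    · by_cases h2 : 1 < p.2.length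
      · simp only [h1, if_neg, not_false_iff, h2, if_pos]
        exact ih _ _ _
      · simp only [h1, if_neg, not_false_iff, h2]
        exact ih _ _ _

theorem conf_nodup (pk : List (String × List String)) (cf : PySem.Set String)
    (h : cf.Nodup) :
    (pk.foldl (fun c p => if p.2.length = 1 then PySem.Set.update c p.2 else c) cf).Nodup := by
  induction pk generalizing cf with
  | nil => exact h
  | cons p rest ih =>
    simp only [List.foldl_cons]
    by_cases h1 : p.2.length = 1
    · simp only [h1, if_pos]
      exact ih _ (PySem.Set.nodup_update _ _ h)
    · simp only [h1, if_neg, not_false_iff]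
      exact ih _ h

theorem act_mem (pk : List (String × List String)) (ac : PySem.Set String) (x : String) :
    x ∈ pk.foldl (fun a p => if p.2.length = 1 then a
        else if 1 < p.2.length then PySem.Set.add a p.1 else a) ac ↔
      x ∈ ac ∨ ∃ p ∈ pk, x = p.1 ∧ 1 < p.2.length := by
  induction pk generalizing ac with
  | nil => simp
  | cons p rest ih =>
    simp only [List.foldl_cons, List.mem_cons]
    by_cases h1 : p.2.length = 1
    · simp only [h1, if_pos, ih]
      constructor
      · rintro (h | ⟨q, hq, rfl, hl⟩)
        · exact Or.inl h
        · exact Or.inr ⟨q, Or.inr hq, rfl, hl⟩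
      · rintro (h | ⟨q, (rfl | hq), rfl, hl⟩)
        · exact Or.inl h
        · omega
        · exact Or.inr ⟨q, hq, rfl, hl⟩
    · by_cases h2 : 1 < p.2.length
      · simp only [h1, if_neg, not_false_iff, h2, if_pos, ih, PySem.Set.mem_add]
        constructor
        · rintro ((h | rfl) | ⟨q, hq, rfl, hl⟩)
          · exact Or.inl h
          · exact Or.inr ⟨p, Or.inl rfl, rfl, h2⟩
          · exact Or.inr ⟨q, Or.inr hq, rfl, hl⟩
        · rintro (h | ⟨q, (rfl | hq), rfl, hl⟩)
          · exact Or.inl (Or.inl h)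
          · exact Or.inl (Or.inr rfl)
          · exact Or.inr ⟨q, hq, rfl, hl⟩
      · simp only [h1, if_neg, not_false_iff, h2, ih]
        constructor
        · rintro (h | ⟨q, hq, rfl, hl⟩)
          · exact Or.inl h
          · exact Or.inr ⟨q, Or.inr hq, rfl, hl⟩
        · rintro (h | ⟨q, (rfl | hq), rfl, hl⟩)
          · exact Or.inl h
          · exact absurd hl h2
          · exact Or.inr ⟨q, hq, rfl, hl⟩

theorem idx_inner_mono (ls : List String) (d : PySem.Dict String (List String))
    (m c y : String) (h : y ∈ d.getD c []) :
    y ∈ (ls.foldl (fun i l => i.modify l [] (· ++ [m])) d).getD c [] := by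
  induction ls generalizing d with
  | nil => exact h
  | cons l rest ih =>
    simp only [List.foldl_cons]
    refine ih _ ?_
    rw [PySem.Dict.getD_modify]
    by_cases hcl : c = l
    · simp only [hcl, if_pos]
      rw [← hcl]
      exact List.mem_append_left _ h
    · simp only [hcl, if_neg, not_false_iff]
      exact h

theorem idx_inner_self (ls : List String) (d : PySem.Dict String (List String))
    (m c : String) (h : c ∈ ls) :
    m ∈ (ls.foldl (fun i l => i.modify l [] (· ++ [m])) d).getD c [] := by
  induction ls generalizing d with
  | nil => cases h
  | cons l rest ih =>
    simp only [List.foldl_cons]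
    by_cases hcl : c = l
    · refine idx_inner_mono rest _ m c m ?_
      rw [PySem.Dict.getD_modify]
      simp [hcl]
    · exact ih _ (by rcases List.mem_cons.mp h with h' | h'; exact absurd h' hcl; exact h')

theorem idx_outer_mono (pk : List (String × List String))
    (d : PySem.Dict String (List String)) (c y : String) (h : y ∈ d.getD c []) :
    y ∈ (pk.foldl (fun i p => if p.2.length = 1 then i
        else if 1 < p.2.length then p.2.foldl (fun i l => i.modify l [] (· ++ [p.1])) i
        else i) d).getD c [] := by
  induction pk generalizing d with
  | nil => exact h
  | cons p rest ih =>
    simp only [List.foldl_cons]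
    by_cases h1 : p.2.length = 1
    · simp only [h1, if_pos]
      exact ih _ h
    · by_cases h2 : 1 < p.2.length
      · simp only [h1, if_neg, not_false_iff, h2, if_pos]
        exact ih _ (idx_inner_mono _ _ _ _ _ h)
      · simp only [h1, if_neg, not_false_iff, h2]
        exact ih _ h

theorem idx_covers (pk : List (String × List String))
    (d : PySem.Dict String (List String)) (p : String × List String) (c : String)
    (hp : p ∈ pk) (hlen : 1 < p.2.length) (hc : c ∈ p.2) :
    p.1 ∈ (pk.foldl (fun i p => if p.2.length = 1 then i
        else if 1 < p.2.length then p.2.foldl (fun i l => i.modify l [] (· ++ [p.1])) i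
        else i) d).getD c [] := by
  induction pk generalizing d with
  | nil => cases hp
  | cons q rest ih =>
    simp only [List.foldl_cons]
    rcases List.mem_cons.mp hp with rfl | hp'
    · have h1 : ¬ p.2.length = 1 := by omega
      simp only [h1, if_neg, not_false_iff, hlen, if_pos]
      exact idx_outer_mono rest _ c p.1 (idx_inner_self _ _ _ _ hc)
    · exact ih _ hp'

-- ===== VERDICT (by name: the statement is the Claim_ definition above) =====
theorem cull_extras_spec : Claim_equal_cull_extras := by
  intro pk _ hpre
  obtain ⟨hkeys, -⟩ := hpre
  unfold Spec_cull_extras cull_extras cull_extras_alt initB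
  rw [initB_split pk PySem.Dict.empty [] []]
  have hcf : pk.foldl (fun c p => if p.2.length = 1 then PySem.Set.union c p.2 else c) [] =
      pk.foldl (fun c p => if p.2.length = 1 then PySem.Set.update c p.2 else c) [] := rfl
  rw [hcf]
  refine main_loop_eq
    (pvSize pk + (pk.foldl (fun a p => if p.2.length = 1 then a
      else if 1 < p.2.length then PySem.Set.add a p.1 else a) []).length)
    pk _ _ _ _ le_rfl hkeys (conf_nodup pk [] List.nodup_nil) (conf_nodup pk [] List.nodup_nil)
    (fun x => Iff.rfl) ?_ ?_ ?_
  · intro m hm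
    rcases (act_mem pk [] m).mp hm with h | ⟨p, hp, rfl, -⟩
    · cases h
    · exact List.mem_map_of_mem hp
  · intro p hp
    constructor
    · intro h
      rcases (act_mem pk [] p.1).mp h with h' | ⟨q, hq, he, hl⟩
      · cases h'
      · rwa [key_unique pk hkeys p q hp hq he]
    · intro hl
      exact (act_mem pk [] p.1).mpr (Or.inr ⟨p, hp, rfl, hl⟩)
  · intro p hp hpa c hcp
    rcases (act_mem pk [] p.1).mp hpa with h' | ⟨q, hq, he, hl⟩
    · cases h'
    · have hpq : p = q := key_unique pk hkeys p q hp hq he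
      subst hpq
      exact idx_covers pk _ p c hp hl hcp
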